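-- pv_equiv track=rewrite | github.com/richardstephens/useful-scripts | shadowcatcher.py | recursive_get_rdep_paths
-- ===== SOURCE A (Python) =====
-- def recursive_get_rdep_paths(target, rdeps, path):
--     paths = []
--     path.append(target)
--     if target in rdeps:
--         for t in rdeps[target]:
--             paths.extend(recursive_get_rdep_paths(t, rdeps, path.copy()))
--     else:
--         paths.append(path)
--     return paths
-- ===== SOURCE B (Python) =====
-- def recursive_get_rdep_paths(target, rdeps, path):
--     # Iterative level-synchronous expansion instead of recursion: keep a work
--     # list of (done, node, path) items and expand every pending item one level
--     # per round until all items are finished leaves; order of items preserves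
--     # A's depth-first output order.  Like A, appends target to the caller's
--     # `path` (same observable mutation).
--     path.append(target)
--     items = [(False, target, path.copy())]
--     while any(not done for done, _, _ in items):
--         new = []
--         for done, node, p in items:
--             if done:
--                 new.append((done, node, p))
--             elif node in rdeps:
--                 new.extend((False, t, p + [t]) for t in rdeps[node])
--             else:
--                 new.append((True, node, p))
--         items = new
--     return [p for done, _, p in items if done]
-- ===== Notes on version B (the rewrite author's own statement) =====
-- stated objective: alternative
-- what changed: A enumerates leaf paths by recursion, copying the path at every call and concatenating child result lists; B is iterative: a work list of (done, node, path) items expanded one level per round (breadth-synchronous frontier) until every item is a finished leaf, then the finished paths are read off in order.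
import Mathlib
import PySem

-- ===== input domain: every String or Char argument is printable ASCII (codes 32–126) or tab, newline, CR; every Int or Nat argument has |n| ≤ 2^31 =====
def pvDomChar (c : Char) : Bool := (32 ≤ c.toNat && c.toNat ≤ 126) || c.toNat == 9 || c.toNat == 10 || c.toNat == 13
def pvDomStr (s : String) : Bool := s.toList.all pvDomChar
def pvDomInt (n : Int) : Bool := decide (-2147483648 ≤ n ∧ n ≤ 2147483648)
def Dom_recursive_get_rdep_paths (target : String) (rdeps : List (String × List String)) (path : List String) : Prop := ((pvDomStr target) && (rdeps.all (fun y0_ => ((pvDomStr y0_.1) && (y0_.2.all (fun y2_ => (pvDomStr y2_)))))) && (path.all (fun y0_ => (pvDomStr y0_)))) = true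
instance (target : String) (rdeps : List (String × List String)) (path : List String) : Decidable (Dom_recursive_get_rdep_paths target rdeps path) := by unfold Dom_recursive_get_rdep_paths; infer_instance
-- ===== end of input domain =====

-- B replaces A's recursive enumeration by an iterative work-list expanded one level per
-- round until all items are finished leaves (alternative decomposition; both A and B also
-- append `target` to the caller's `path` argument — return values are what is proved).


-- ===== PORT A =====
-- A is recursive on the graph; a cycle reachable from `target` makes Python's A recurse
-- forever (RecursionError), so the port carries fuel.  On acyclic reachable regions the
-- recursion depth is at most (number of keys) + 1, so fuel rdeps.length + 2 never runs
-- out inside Pre_.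
def recursive_get_rdep_paths_fuel (fuel : Nat) (target : String) (rdeps : List (String × List String)) (path : List String) : List (List String) :=
  match fuel with
  | 0 => []
  | fuel + 1 =>
    -- paths = []; path.append(target)
    let path := path ++ [target]
    match List.lookup target rdeps with
    | some ts =>
        -- for t in rdeps[target]: paths.extend(recursive(t, rdeps, path.copy()))
        ts.foldl (fun paths t => paths ++ recursive_get_rdep_paths_fuel fuel t rdeps path) []
    | none => [path]   -- paths.append(path)

def recursive_get_rdep_paths (target : String) (rdeps : List (String × List String)) (path : List String) : List (List String) :=
  recursive_get_rdep_paths_fuel (rdeps.length + 2) target rdeps path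

-- ===== PORT B =====
-- B keeps a work list of (done, node, path) items; each round expands every pending item
-- by one level.  Python's `while any(not done …)` loop can run forever on a cycle, so the
-- loop carries fuel; rdeps.length + 2 rounds finish every item inside Pre_.
def pvStepB (rdeps : List (String × List String)) (items : List (Bool × String × List String)) : List (Bool × String × List String) :=
  items.flatMap fun it =>
    if it.1 then [it]
    else match List.lookup it.2.1 rdeps with
      | some ts => ts.map (fun t => (false, t, it.2.2 ++ [t]))
      | none => [(true, it.2.1, it.2.2)]

def pvRunB (rdeps : List (String × List String)) : Nat → List (Bool × String × List String) → List (Bool × String × List String)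
  | 0, items => items
  | fuel + 1, items =>
      if items.all (fun it => it.1) then items
      else pvRunB rdeps fuel (pvStepB rdeps items)

def recursive_get_rdep_paths_alt (target : String) (rdeps : List (String × List String)) (path : List String) : List (List String) :=
  (pvRunB rdeps (rdeps.length + 2) [(false, target, path ++ [target])]).filterMap
    (fun it => if it.1 then some it.2.2 else none)

-- ===== PRECONDITION & SPEC =====
-- successors of a node (empty for non-keys)
def pvSuccs (rdeps : List (String × List String)) (a : String) : List String :=
  (List.lookup a rdeps).getD []

-- all nodes at distance ≤ n from the set s
def pvIterReach (rdeps : List (String × List String)) : Nat → List String → List String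
  | 0, s => s
  | n + 1, s => pvIterReach rdeps n ((s ++ s.flatMap (pvSuccs rdeps)).dedup)

-- Python's A recurses forever (RecursionError) exactly when a cycle is reachable from
-- `target`; Pre_ admits the inputs with no cycle reachable from `target`.
def Pre_recursive_get_rdep_paths (target : String) (rdeps : List (String × List String)) (path : List String) : Prop :=
  ∀ k ∈ pvIterReach rdeps (rdeps.length + 1) [target],
    k ∉ pvIterReach rdeps (rdeps.length + 1) (pvSuccs rdeps k)

instance (target : String) (rdeps : List (String × List String)) (path : List String) : Decidable (Pre_recursive_get_rdep_paths target rdeps path) := by unfold Pre_recursive_get_rdep_paths; infer_instance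

def pvWitness_recursive_get_rdep_paths : String × (List (String × List String)) × List String :=
  ("a", [("a", ["b", "c"]), ("b", ["d"])], ["r"])

def Spec_recursive_get_rdep_paths (target : String) (rdeps : List (String × List String)) (path : List String) (out : List (List String)) : Prop := out = recursive_get_rdep_paths_alt target rdeps path
instance (target : String) (rdeps : List (String × List String)) (path : List String) (out : List (List String)) : Decidable (Spec_recursive_get_rdep_paths target rdeps path out) := by unfold Spec_recursive_get_rdep_paths; infer_instance

-- ===== CLAIM (what is proved, stated in full; the proofs are below) =====
def Claim_equal_recursive_get_rdep_paths : Prop := ∀ (target : String) (rdeps : List (String × List String)) (path : List String), Dom_recursive_get_rdep_paths target rdeps path → Pre_recursive_get_rdep_paths target rdeps path → Spec_recursive_get_rdep_paths target rdeps path (recursive_get_rdep_paths target rdeps path)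

-- ===== LEMMAS AND PROOFS =====

-- the value an item of B's work list eventually contributes, with fuel n
def pvG (rdeps : List (String × List String)) : Nat → (Bool × String × List String) → List (List String)
  | _, (true, _, p) => [p]
  | 0, (false, _, _) => []
  | n + 1, (false, node, p) =>
      match List.lookup node rdeps with
      | some ts => ts.flatMap (fun t => pvG rdeps n (false, t, p ++ [t]))
      | none => [p]

theorem pvG_done (rdeps : List (String × List String)) (n : Nat) (it : Bool × String × List String)
    (h : it.1 = true) : pvG rdeps n it = [it.2.2] := by
  obtain ⟨b, node, p⟩ := it
  cases b with
  | true => cases n <;> rfl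
  | false => simp at h

-- one expansion step followed by fuel n contributes the same as fuel n+1 directly
theorem pvStepB_g (rdeps : List (String × List String)) (n : Nat) (it : Bool × String × List String) :
    (pvStepB rdeps [it]).flatMap (pvG rdeps n) = pvG rdeps (n + 1) it := by
  obtain ⟨b, node, p⟩ := it
  cases b with
  | true => simp [pvStepB, pvG]
  | false =>
    simp only [pvStepB, List.flatMap_cons, List.flatMap_nil, List.append_nil]
    cases h : List.lookup node rdeps with
    | none => simp [pvG, h]
    | some ts => simp [pvG, h, List.flatMap_map]

-- extraction of B's run equals itemwise contributions
theorem pvRunB_extract (rdeps : List (String × List String)) (n : Nat) :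
    ∀ items : List (Bool × String × List String),
      (pvRunB rdeps n items).filterMap (fun it => if it.1 then some it.2.2 else none)
        = items.flatMap (pvG rdeps n) := by
  induction n with
  | zero =>
    intro items
    induction items with
    | nil => rfl
    | cons it items ih =>
      obtain ⟨b, node, p⟩ := it
      cases b <;> simp [pvRunB, pvG] at ih ⊢ <;> simpa [pvRunB] using ih
  | succ n ih =>
    intro items
    simp only [pvRunB]
    split
    · rename_i hall
      simp only [List.all_eq_true] at hall
      induction items with
      | nil => rfl
      | cons it items ihl =>
        have hit := hall it (by simp)
        rw [List.filterMap_cons, List.flatMap_cons, pvG_done rdeps (n+1) it hit, hit]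
        simp only [if_pos]
        rw [ihl (fun x hx => hall x (by simp [hx]))]
        rfl
    · rw [ih (pvStepB rdeps items)]
      have : pvStepB rdeps items = items.flatMap (fun it => pvStepB rdeps [it]) := by
        simp [pvStepB, List.flatMap_cons]
      rw [this, List.flatMap_assoc]
      exact List.flatMap_congr (fun it _ => pvStepB_g rdeps n it)

-- A's fuel recursion computes exactly the pending-item contribution
theorem pvA_eq_g (n : Nat) : ∀ (target : String) (rdeps : List (String × List String)) (path : List String),
    recursive_get_rdep_paths_fuel n target rdeps path = pvG rdeps n (false, target, path ++ [target]) := by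
  induction n with
  | zero => intro target rdeps path; rfl
  | succ n ih =>
    intro target rdeps path
    simp only [recursive_get_rdep_paths_fuel, pvG]
    cases h : List.lookup target rdeps with
    | none => rfl
    | some ts =>
      simp only []
      rw [PySem.List.foldl_append_eq_flatMap]
      simp only [List.nil_append]
      exact List.flatMap_congr (fun t _ => ih t rdeps (path ++ [target]))

-- ===== VERDICT (by name: the statement is the Claim_ definition above) =====
theorem recursive_get_rdep_paths_spec : Claim_equal_recursive_get_rdep_paths := by
  intro target rdeps path _ _
  unfold Spec_recursive_get_rdep_paths recursive_get_rdep_paths recursive_get_rdep_paths_alt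
  rw [pvRunB_extract, List.flatMap_cons, List.flatMap_nil, List.append_nil, ← pvA_eq_g]
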